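-- pv_equiv track=rewrite | github.com/daschne8/code-challenges-solutions | Project Euler/Euler85.py | rect_in_grid
-- ===== SOURCE A (Python) =====
-- def rect_in_grid(cols, rows):
--     total_rects = 0
--     for down_cols in range(cols,0,-1):
--         for down_rows in range(rows,0,-1):
--             for i in range(down_cols):
--                 for j in range(down_rows):
--                     total_rects += 1
--     return total_rects
-- ===== SOURCE B (Python) =====
-- def rect_in_grid(cols, rows):
--     c = cols if cols > 0 else 0
--     r = rows if rows > 0 else 0
--     return (c * (c + 1) // 2) * (r * (r + 1) // 2)
-- ===== Notes on version B (the rewrite author's own statement) =====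
-- stated objective: faster
-- what changed: Replaced the four nested counting loops by the closed-form product of two triangular numbers (c(c+1)/2)*(r(r+1)/2).
import Mathlib
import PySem

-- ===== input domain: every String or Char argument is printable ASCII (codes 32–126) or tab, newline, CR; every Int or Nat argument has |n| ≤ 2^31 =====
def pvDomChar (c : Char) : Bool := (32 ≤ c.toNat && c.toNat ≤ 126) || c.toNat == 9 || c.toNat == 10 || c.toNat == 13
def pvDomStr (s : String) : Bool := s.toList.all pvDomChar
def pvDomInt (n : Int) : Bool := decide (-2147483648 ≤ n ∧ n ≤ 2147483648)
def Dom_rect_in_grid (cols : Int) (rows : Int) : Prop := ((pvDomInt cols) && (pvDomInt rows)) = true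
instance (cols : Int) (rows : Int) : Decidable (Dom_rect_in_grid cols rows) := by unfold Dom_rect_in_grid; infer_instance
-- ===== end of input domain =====

-- B replaces A's four nested counting loops by the closed-form product of two triangular numbers (objective: faster, asymptotic).

-- ===== PORT A =====
def rect_in_grid (cols : Int) (rows : Int) : Int :=
  let total_rects : Int := 0
  (PySem.List.pyRange cols 0 (-1)).foldl (fun total_rects down_cols =>
    (PySem.List.pyRange rows 0 (-1)).foldl (fun total_rects down_rows =>
      (PySem.List.pyRange 0 down_cols 1).foldl (fun total_rects _i =>
        (PySem.List.pyRange 0 down_rows 1).foldl (fun total_rects _j =>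
          total_rects + 1) total_rects) total_rects) total_rects) total_rects

-- ===== PORT B =====
def rect_in_grid_alt (cols : Int) (rows : Int) : Int :=
  let c : Int := if cols > 0 then cols else 0
  let r : Int := if rows > 0 then rows else 0
  PySem.Int.floordiv (c * (c + 1)) 2 * PySem.Int.floordiv (r * (r + 1)) 2

-- ===== PRECONDITION & SPEC =====
def Spec_rect_in_grid (cols : Int) (rows : Int) (out : Int) : Prop := out = rect_in_grid_alt cols rows
instance (cols : Int) (rows : Int) (out : Int) : Decidable (Spec_rect_in_grid cols rows out) := by unfold Spec_rect_in_grid; infer_instance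

-- ===== CLAIM (what is proved, stated in full; the proofs are below) =====
def Claim_equal_rect_in_grid : Prop := ∀ (cols : Int) (rows : Int), Dom_rect_in_grid cols rows → Spec_rect_in_grid cols rows (rect_in_grid cols rows)

-- ===== LEMMAS AND PROOFS =====

-- the innermost loop adds 1 once per element
theorem pv_fold_count (l : List Int) (s : Int) :
    l.foldl (fun a (_ : Int) => a + 1) s = s + l.length := by
  induction l generalizing s with
  | nil => simp
  | cons x t ih => simp [List.foldl, ih]; ring

-- a loop adding a constant k per element
theorem pv_fold_const (l : List Int) (s k : Int) :
    l.foldl (fun a (_ : Int) => a + k) s = s + l.length * k := by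
  induction l generalizing s with
  | nil => simp
  | cons x t ih => simp [List.foldl, ih]; ring

-- the countdown loop summing c * x over x = n, n-1, …, 1
theorem pv_fold_tri (n : Int) (s c : Int) :
    (PySem.List.pyRange n 0 (-1)).foldl (fun a x => a + c * x) s
      = s + c * ((n.toNat * (n.toNat + 1) / 2 : Nat) : Int) := by
  by_cases h : n ≤ 0
  · rw [PySem.List.pyRange_neg_one_eq_nil h]
    have : n.toNat = 0 := Int.toNat_of_nonpos h
    simp [this]
  · push Not at h
    rw [PySem.List.pyRange_neg_one_cons h, List.foldl_cons,
        pv_fold_tri (n - 1) (s + c * n) c]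
    have hn : (n - 1).toNat + 1 = n.toNat := by omega
    have h2 : ((n - 1).toNat * ((n - 1).toNat + 1) / 2 : Nat) + n.toNat
        = (n.toNat * (n.toNat + 1) / 2 : Nat) := by
      obtain ⟨a, ha⟩ := Nat.even_mul_succ_self (n - 1).toNat
      have hm : n.toNat * (n.toNat + 1)
          = (n - 1).toNat * ((n - 1).toNat + 1) + 2 * n.toNat := by
        rw [← hn]; ring
      omega
    have hcast : (n.toNat : Int) = n := Int.toNat_of_nonneg (le_of_lt h)
    push_cast [← h2]
    rw [hcast]; ring
termination_by n.toNat
decreasing_by omega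

theorem rect_in_grid_eq (cols rows : Int) :
    rect_in_grid cols rows
      = ((cols.toNat * (cols.toNat + 1) / 2 : Nat) : Int)
        * ((rows.toNat * (rows.toNat + 1) / 2 : Nat) : Int) := by
  unfold rect_in_grid
  have inner2 : ∀ (dc dr s : Int),
      (PySem.List.pyRange 0 dc 1).foldl (fun a _i =>
        (PySem.List.pyRange 0 dr 1).foldl (fun a _j => a + 1) a) s
        = s + (dc.toNat : Int) * (dr.toNat : Int) := by
    intro dc dr s
    have : (fun (a : Int) (_i : Int) =>
        (PySem.List.pyRange 0 dr 1).foldl (fun a _j => a + 1) a)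
        = fun (a : Int) (_i : Int) => a + (dr.toNat : Int) := by
      funext a _
      rw [pv_fold_count]
      simp [PySem.List.length_pyRange_one]
    rw [this, pv_fold_const]
    simp [PySem.List.length_pyRange_one]
  have mid : ∀ (dc s : Int),
      (PySem.List.pyRange rows 0 (-1)).foldl (fun a dr =>
        (PySem.List.pyRange 0 dc 1).foldl (fun a _i =>
          (PySem.List.pyRange 0 dr 1).foldl (fun a _j => a + 1) a) a) s
        = s + (dc.toNat : Int) * ((rows.toNat * (rows.toNat + 1) / 2 : Nat) : Int) := by
    intro dc s
    have hfun : (fun (a : Int) (dr : Int) =>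
        (PySem.List.pyRange 0 dc 1).foldl (fun a _i =>
          (PySem.List.pyRange 0 dr 1).foldl (fun a _j => a + 1) a) a)
        = fun (a : Int) (dr : Int) => a + (dc.toNat : Int) * (dr.toNat : Int) := by
      funext a dr
      exact inner2 dc dr a
    rw [hfun]
    have hmem : ∀ x ∈ PySem.List.pyRange rows 0 (-1), (x.toNat : Int) = x := by
      intro x hx
      rw [PySem.List.mem_pyRange_neg_one] at hx
      exact Int.toNat_of_nonneg (le_of_lt hx.1)
    calc (PySem.List.pyRange rows 0 (-1)).foldl
            (fun a dr => a + (dc.toNat : Int) * (dr.toNat : Int)) s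
        = (PySem.List.pyRange rows 0 (-1)).foldl
            (fun a dr => a + (dc.toNat : Int) * dr) s := by
          apply PySem.List.foldl_congr_mem
          intro a dr hdr; rw [hmem dr hdr]
      _ = s + (dc.toNat : Int) * ((rows.toNat * (rows.toNat + 1) / 2 : Nat) : Int) :=
          pv_fold_tri rows s _
  have houter : (fun (a : Int) (dc : Int) =>
      (PySem.List.pyRange rows 0 (-1)).foldl (fun a dr =>
        (PySem.List.pyRange 0 dc 1).foldl (fun a _i =>
          (PySem.List.pyRange 0 dr 1).foldl (fun a _j => a + 1) a) a) a)
      = fun (a : Int) (dc : Int) =>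
          a + ((rows.toNat * (rows.toNat + 1) / 2 : Nat) : Int) * (dc.toNat : Int) := by
    funext a dc
    rw [mid dc a]; ring
  rw [houter]
  have hmem : ∀ x ∈ PySem.List.pyRange cols 0 (-1), (x.toNat : Int) = x := by
    intro x hx
    rw [PySem.List.mem_pyRange_neg_one] at hx
    exact Int.toNat_of_nonneg (le_of_lt hx.1)
  calc (PySem.List.pyRange cols 0 (-1)).foldl
          (fun a dc => a + ((rows.toNat * (rows.toNat + 1) / 2 : Nat) : Int) * (dc.toNat : Int)) 0
      = (PySem.List.pyRange cols 0 (-1)).foldl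
          (fun a dc => a + ((rows.toNat * (rows.toNat + 1) / 2 : Nat) : Int) * dc) 0 := by
        apply PySem.List.foldl_congr_mem
        intro a dc hdc; rw [hmem dc hdc]
    _ = 0 + ((rows.toNat * (rows.toNat + 1) / 2 : Nat) : Int)
          * ((cols.toNat * (cols.toNat + 1) / 2 : Nat) : Int) := pv_fold_tri cols 0 _
    _ = _ := by ring

theorem rect_in_grid_alt_eq (cols rows : Int) :
    rect_in_grid_alt cols rows
      = ((cols.toNat * (cols.toNat + 1) / 2 : Nat) : Int)
        * ((rows.toNat * (rows.toNat + 1) / 2 : Nat) : Int) := by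
  unfold rect_in_grid_alt
  have key : ∀ m : Int,
      PySem.Int.floordiv ((if m > 0 then m else 0) * ((if m > 0 then m else 0) + 1)) 2
        = ((m.toNat * (m.toNat + 1) / 2 : Nat) : Int) := by
    intro m
    split_ifs with h
    · have : m = (m.toNat : Int) := (Int.toNat_of_nonneg (le_of_lt h)).symm
      rw [this]
      have : ((m.toNat : Int)) * ((m.toNat : Int) + 1) = ((m.toNat * (m.toNat + 1) : Nat) : Int) := by push_cast; ring
      rw [this]
      exact_mod_cast PySem.Int.floordiv_natCast (m.toNat * (m.toNat + 1)) 2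
    · have : m.toNat = 0 := Int.toNat_of_nonpos (by omega)
      simp [this, PySem.Int.floordiv]
  simp only [key]

-- ===== VERDICT (by name: the statement is the Claim_ definition above) =====
theorem rect_in_grid_spec : Claim_equal_rect_in_grid := by
  intro cols rows _
  unfold Spec_rect_in_grid
  rw [rect_in_grid_eq, rect_in_grid_alt_eq]
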